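-- pv_equiv track=rewrite | github.com/markusstraub/advent_of_code_2021 | 02/advent02.py | get_position_part1
-- ===== SOURCE A (Python) =====
-- def get_position_part1(movements, start_horizontal=0, start_depth=0):
--     horizontal = start_horizontal
--     depth = start_depth
--     for direction, units in movements:
--         if direction == "forward":
--             horizontal += units
--         elif direction == "down":
--             depth += units
--         elif direction == "up":
--             depth -= units
--         else:
--             raise ValueError(f"unknown movement direction: {direction}")
--     return (horizontal, depth)
-- ===== SOURCE B (Python) =====
-- def get_position_part1(movements, start_horizontal=0, start_depth=0):
--     moves = list(movements)
--     for direction, _ in moves: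
--         if direction not in ("forward", "down", "up"):
--             raise ValueError(f"unknown movement direction: {direction}")
--     horizontal = start_horizontal + sum(u for d, u in moves if d == "forward")
--     depth = (start_depth
--              + sum(u for d, u in moves if d == "down")
--              - sum(u for d, u in moves if d == "up"))
--     return (horizontal, depth)
-- ===== Notes on version B (the rewrite author's own statement) =====
-- stated objective: alternative
-- what changed: Replaces the single stateful accumulation loop by a validation pass plus three direction-grouped sum reductions combined arithmetically.
import Mathlib
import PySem

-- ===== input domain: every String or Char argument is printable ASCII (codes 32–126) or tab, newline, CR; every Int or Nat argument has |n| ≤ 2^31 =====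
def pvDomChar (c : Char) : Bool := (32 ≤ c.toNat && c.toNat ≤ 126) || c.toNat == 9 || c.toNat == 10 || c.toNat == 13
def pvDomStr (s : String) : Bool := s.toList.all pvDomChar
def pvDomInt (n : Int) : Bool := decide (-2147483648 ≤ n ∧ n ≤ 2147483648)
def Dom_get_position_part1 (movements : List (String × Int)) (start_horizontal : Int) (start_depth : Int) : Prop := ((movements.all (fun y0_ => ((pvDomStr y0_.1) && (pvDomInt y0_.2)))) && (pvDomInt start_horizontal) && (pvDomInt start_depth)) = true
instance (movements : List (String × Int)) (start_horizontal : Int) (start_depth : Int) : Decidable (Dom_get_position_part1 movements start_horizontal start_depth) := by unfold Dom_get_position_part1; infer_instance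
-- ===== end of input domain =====

-- ===== PORT A =====
-- literal loop of A: fold over movements updating (horizontal, depth); on an unknown
-- direction Python raises ValueError — those inputs are excluded by Pre_ and the branch
-- returns the state unchanged (never reached inside Pre_).
def getPosLoopA : List (String × Int) → Int → Int → Int × Int
  | [], horizontal, depth => (horizontal, depth)
  | (direction, units) :: rest, horizontal, depth =>
    if direction == "forward" then getPosLoopA rest (horizontal + units) depth
    else if direction == "down" then getPosLoopA rest horizontal (depth + units)
    else if direction == "up" then getPosLoopA rest horizontal (depth - units)
    else (horizontal, depth)

def get_position_part1 (movements : List (String × Int)) (start_horizontal : Int) (start_depth : Int) : Int × Int :=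
  getPosLoopA movements start_horizontal start_depth

-- ===== PORT B =====
-- B: direction-grouped sums (the validation pass of Source B raises exactly outside Pre_).
def get_position_part1_alt (movements : List (String × Int)) (start_horizontal : Int) (start_depth : Int) : Int × Int :=
  (start_horizontal + ((movements.filter (fun p => p.1 == "forward")).map Prod.snd).sum,
   start_depth + ((movements.filter (fun p => p.1 == "down")).map Prod.snd).sum
               - ((movements.filter (fun p => p.1 == "up")).map Prod.snd).sum)

-- ===== PRECONDITION & SPEC =====
-- Pre_ excludes exactly the inputs on which A raises ValueError (an unknown direction).
def Pre_get_position_part1 (movements : List (String × Int)) (start_horizontal : Int) (start_depth : Int) : Prop :=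
  ∀ p ∈ movements, p.1 = "forward" ∨ p.1 = "down" ∨ p.1 = "up"
instance (movements : List (String × Int)) (start_horizontal : Int) (start_depth : Int) : Decidable (Pre_get_position_part1 movements start_horizontal start_depth) := by unfold Pre_get_position_part1; infer_instance
def pvWitness_get_position_part1 : (List (String × Int)) × Int × Int := ([("forward", 3), ("down", 2), ("up", 1)], 0, 0)
def Spec_get_position_part1 (movements : List (String × Int)) (start_horizontal : Int) (start_depth : Int) (out : Int × Int) : Prop := out = get_position_part1_alt movements start_horizontal start_depth
instance (movements : List (String × Int)) (start_horizontal : Int) (start_depth : Int) (out : Int × Int) : Decidable (Spec_get_position_part1 movements start_horizontal start_depth out) := by unfold Spec_get_position_part1; infer_instance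

-- ===== CLAIM (what is proved, stated in full; the proofs are below) =====
def Claim_equal_get_position_part1 : Prop := ∀ (movements : List (String × Int)) (start_horizontal : Int) (start_depth : Int), Dom_get_position_part1 movements start_horizontal start_depth → Pre_get_position_part1 movements start_horizontal start_depth → Spec_get_position_part1 movements start_horizontal start_depth (get_position_part1 movements start_horizontal start_depth)

-- ===== LEMMAS AND PROOFS =====
theorem loopA_eq_alt (movements : List (String × Int)) (sh sd : Int)
    (hpre : Pre_get_position_part1 movements sh sd) :
    getPosLoopA movements sh sd = get_position_part1_alt movements sh sd := by
  induction movements generalizing sh sd with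
  | nil => simp [getPosLoopA, get_position_part1_alt]
  | cons p rest ih =>
    obtain ⟨d, u⟩ := p
    have hrest : Pre_get_position_part1 rest sh sd := fun q hq => hpre q (List.mem_cons_of_mem _ hq)
    rcases hpre (d, u) List.mem_cons_self with h | h | h
    · subst h
      simp [getPosLoopA, get_position_part1_alt, ih (sh + u) sd hrest]
      ring
    · subst h
      simp [getPosLoopA, get_position_part1_alt, ih sh (sd + u) hrest]
      ring
    · subst h
      simp [getPosLoopA, get_position_part1_alt, ih sh (sd - u) hrest]
      ring

-- ===== VERDICT (by name: the statement is the Claim_ definition above) =====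
theorem get_position_part1_spec : Claim_equal_get_position_part1 := by
  intro movements sh sd _ hpre
  unfold Spec_get_position_part1 get_position_part1
  exact loopA_eq_alt movements sh sd hpre
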